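-- pv_equiv track=rewrite | github.com/oakeley/FractalPangenome | rnaseq_expression_analyzer.py | _build_transcript_kmer_index
-- ===== SOURCE A (Python) =====
-- from typing import Dict, List, Tuple, Optional, Set, Any
-- from collections import defaultdict, Counter
--
-- def _build_transcript_kmer_index(transcript_variants: Dict[str, str], k: int = 31) -> Dict[str, Set[str]]:
--     """Build k-mer index for fast transcript matching"""
--
--     kmer_index = defaultdict(set)
--
--     for transcript_id, sequence in transcript_variants.items():
--         for i in range(len(sequence) - k + 1):
--             kmer = sequence[i:i+k]
--             if 'N' not in kmer:  # Skip k-mers with ambiguous bases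
--                 kmer_index[kmer].add(transcript_id)
--
--     return kmer_index
-- ===== SOURCE B (Python) =====
-- from collections import defaultdict
--
-- def _build_transcript_kmer_index(transcript_variants, k=31):
--     """One pass per sequence: keep a rolling buffer of the most recent
--     ambiguity-free characters (capped at length k); whenever it fills up to
--     length k, the buffer itself is the next clean k-mer."""
--     kmer_index = defaultdict(set)
--     for transcript_id, sequence in transcript_variants.items():
--         buf = ''
--         for ch in sequence:
--             buf = '' if ch == 'N' else (buf + ch)[-k:]
--             if len(buf) == k:
--                 kmer_index[buf].add(transcript_id)
--     return kmer_index
-- ===== Notes on version B (the rewrite author's own statement) =====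
-- stated objective: alternative
-- what changed: Instead of slicing a k-window at every start index and scanning each window for 'N', B makes one pass over the characters keeping a rolling buffer of the most recent ambiguity-free characters capped at length k; whenever the buffer fills to length k it is the next clean k-mer, so there is no index arithmetic and no per-window membership scan.
-- outside the precondition, e.g. on _build_transcript_kmer_index({'t': 'ACGNTT'}, -1): A returns {'': {'t'}}, B returns {}
import Mathlib
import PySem

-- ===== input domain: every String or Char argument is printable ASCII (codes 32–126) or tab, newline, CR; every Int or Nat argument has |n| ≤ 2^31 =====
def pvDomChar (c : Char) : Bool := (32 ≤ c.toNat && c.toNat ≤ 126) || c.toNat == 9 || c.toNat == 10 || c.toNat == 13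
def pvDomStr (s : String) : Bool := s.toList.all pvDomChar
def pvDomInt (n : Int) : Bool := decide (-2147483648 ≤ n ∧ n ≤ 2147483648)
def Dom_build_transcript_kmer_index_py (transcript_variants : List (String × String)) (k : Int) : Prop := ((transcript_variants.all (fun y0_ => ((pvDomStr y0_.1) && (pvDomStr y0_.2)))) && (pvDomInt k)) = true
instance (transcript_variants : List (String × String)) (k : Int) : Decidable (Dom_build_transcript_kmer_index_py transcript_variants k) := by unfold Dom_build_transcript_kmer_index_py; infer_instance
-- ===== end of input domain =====

-- B builds the same index in one pass per sequence with a rolling buffer of the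
-- most recent ambiguity-free characters (capped at k): when the buffer fills to
-- length k it IS the next clean k-mer, so no index arithmetic and no per-window
-- 'N'-membership scan (objective: alternative).

-- ===== PORT A =====
def build_transcript_kmer_index_py (transcript_variants : List (String × String)) (k : Int) : List (String × List String) :=
  (transcript_variants.foldl
    (fun (kmer_index : PySem.Dict String (PySem.Set String)) tv =>
      (PySem.List.pyRange 0 (PySem.Str.len tv.2 - k + 1) 1).foldl
        (fun kmer_index i =>
          let kmer := PySem.Str.slice tv.2 (some i) (some (i + k))
          if !(PySem.Str.isIn "N" kmer) then
            -- defaultdict(set): kmer_index[kmer].add(transcript_id)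
            kmer_index.modify kmer PySem.Set.empty (fun s => PySem.Set.add s tv.1)
          else kmer_index)
        kmer_index)
    PySem.Dict.empty).items

-- ===== PORT B =====
def build_transcript_kmer_index_py_alt (transcript_variants : List (String × String)) (k : Int) : List (String × List String) :=
  (transcript_variants.foldl
    (fun (kmer_index : PySem.Dict String (PySem.Set String)) tv =>
      -- for ch in sequence: buf = '' if ch == 'N' else (buf + ch)[-k:]; if len(buf) == k: add
      (tv.2.toList.foldl
        (fun (st : String × PySem.Dict String (PySem.Set String)) ch =>
          let buf := if ch = 'N' then "" else PySem.Str.slice (st.1.push ch) (some (-k)) none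
          if PySem.Str.len buf = k then
            (buf, st.2.modify buf PySem.Set.empty (fun s => PySem.Set.add s tv.1))
          else (buf, st.2))
        ("", kmer_index)).2)
    PySem.Dict.empty).items

-- ===== PRECONDITION & SPEC =====
-- Pre_ restricts to the natural domain of a k-mer index, k ≥ 1: for k ≤ 0 Python's
-- negative-slice wraparound makes A's returned "k-mers" accidental artefacts of slicing
-- (A still returns a dict there; the programs agree at k = 0 only on empty sequences).
def Pre_build_transcript_kmer_index_py (transcript_variants : List (String × String)) (k : Int) : Prop := 1 ≤ k
instance (transcript_variants : List (String × String)) (k : Int) : Decidable (Pre_build_transcript_kmer_index_py transcript_variants k) := by unfold Pre_build_transcript_kmer_index_py; infer_instance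

def pvWitness_build_transcript_kmer_index_py : (List (String × String)) × Int := ([("t1", "ACGTNAC"), ("t2", "CGT")], 2)

def Spec_build_transcript_kmer_index_py (transcript_variants : List (String × String)) (k : Int) (out : List (String × List String)) : Prop := out = build_transcript_kmer_index_py_alt transcript_variants k
instance (transcript_variants : List (String × String)) (k : Int) (out : List (String × List String)) : Decidable (Spec_build_transcript_kmer_index_py transcript_variants k out) := by unfold Spec_build_transcript_kmer_index_py; infer_instance

-- ===== CLAIM (what is proved, stated in full; the proofs are below) =====
def Claim_equal_build_transcript_kmer_index_py : Prop := ∀ (transcript_variants : List (String × String)) (k : Int), Dom_build_transcript_kmer_index_py transcript_variants k → Pre_build_transcript_kmer_index_py transcript_variants k → Spec_build_transcript_kmer_index_py transcript_variants k (build_transcript_kmer_index_py transcript_variants k)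

-- ===== LEMMAS AND PROOFS =====

-- the dictionary update both ports perform for one k-mer
def pvAdd (tid : String) (d : PySem.Dict String (PySem.Set String)) (km : String) : PySem.Dict String (PySem.Set String) :=
  d.modify km PySem.Set.empty (fun s => PySem.Set.add s tid)

-- the last k characters
def lastN (k : Nat) (l : List Char) : List Char := l.drop (l.length - k)

-- the k-mers B emits, in order, starting from buffer `buf`
def bwins (k : Nat) (buf : List Char) : List Char → List (List Char)
  | [] => []
  | c :: t =>
      let buf' := if c = 'N' then [] else lastN k (buf ++ [c])
      (if buf'.length = k then [buf'] else []) ++ bwins k buf' t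

-- all k-windows of a string, in order of start position
def pvWins (k : Nat) : List Char → List (List Char)
  | [] => []
  | c :: t => if t.length + 1 < k then [] else List.take k (c :: t) :: pvWins k t

def pvP (w : List Char) : Bool := !(PySem.Chars.isIn ['N'] w)

lemma pvP_iff (w : List Char) : pvP w = true ↔ 'N' ∉ w := by
  simp [pvP, PySem.Chars.isIn_eq_false_iff, List.singleton_infix_iff]

lemma pvWins_nil_of_lt {k : Nat} {cs : List Char} (h : cs.length < k) : pvWins k cs = [] := by
  cases cs with
  | nil => rfl
  | cons c t => simp only [pvWins]; rw [if_pos (by simpa using h)]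

lemma pvWins_eq_self {k : Nat} (hk : 1 ≤ k) {cs : List Char} (h : cs.length = k) :
    pvWins k cs = [cs] := by
  cases cs with
  | nil => simp at h; omega
  | cons c t =>
    simp only [pvWins]
    rw [if_neg (by simp at h ⊢; omega), List.take_of_length_le (by omega),
        pvWins_nil_of_lt (by simp at h; omega)]

lemma pvWins_cons_of_le {k : Nat} {c : Char} {t : List Char} (h : k ≤ t.length + 1) :
    pvWins k (c :: t) = List.take k (c :: t) :: pvWins k t := by
  simp only [pvWins]; rw [if_neg (by omega)]

lemma filter_cons_full {k : Nat} (hk : 1 ≤ k) {l1 : List Char} (t : List Char)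
    (hlen : l1.length = k) (hfree : 'N' ∉ l1) :
    (pvWins k (l1 ++ t)).filter pvP = l1 :: (pvWins k (l1.tail ++ t)).filter pvP := by
  cases l1 with
  | nil => simp at hlen; omega
  | cons c r =>
    rw [List.cons_append, pvWins_cons_of_le (by simp at hlen ⊢; omega)]
    have htake : List.take k (c :: (r ++ t)) = c :: r := by
      rw [← List.cons_append, List.take_append_of_le_length (by simp [hlen]),
          List.take_of_length_le (by omega)]
    rw [htake, List.filter_cons_of_pos ((pvP_iff _).mpr hfree)]
    simp

lemma pvWins_decomp {k : Nat} (hk : 1 ≤ k) {a : List Char} (b : List Char) (h : 'N' ∉ a) :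
    (pvWins k (a ++ 'N' :: b)).filter pvP = pvWins k a ++ (pvWins k b).filter pvP := by
  induction a with
  | nil =>
    simp only [List.nil_append]
    by_cases hlen : b.length + 1 < k
    · rw [pvWins_nil_of_lt (cs := 'N' :: b) (by simp; omega),
          pvWins_nil_of_lt (cs := b) (by omega)]
      simp [pvWins]
    · have hexp : pvWins k ('N' :: b) = List.take k ('N' :: b) :: pvWins k b := by
        simp only [pvWins]; rw [if_neg hlen]
      have hNm : pvP (List.take k ('N' :: b)) = false := by
        rcases k with _ | k'
        · omega
        · rw [List.take_succ_cons, Bool.eq_false_iff]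
          intro hP
          exact absurd (List.mem_cons_self ..) ((pvP_iff _).mp hP)
      rw [hexp, List.filter_cons_of_neg (by simp [hNm])]; simp [pvWins]
  | cons c a' ih =>
    have hc : c ≠ 'N' := fun e => h (e ▸ List.mem_cons_self ..)
    have ha : 'N' ∉ a' := fun m => h (List.mem_cons_of_mem _ m)
    by_cases hlen : (a' ++ 'N' :: b).length + 1 < k
    · rw [show (c :: a') ++ 'N' :: b = c :: (a' ++ 'N' :: b) by simp] at *
      rw [pvWins_nil_of_lt (cs := c :: (a' ++ 'N' :: b)) (by simp at hlen ⊢; omega),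
          pvWins_nil_of_lt (cs := c :: a') (by simp at hlen ⊢; omega),
          pvWins_nil_of_lt (cs := b) (by simp at hlen ⊢; omega)]
      simp
    · have hexp : pvWins k (c :: (a' ++ 'N' :: b))
          = List.take k (c :: (a' ++ 'N' :: b)) :: pvWins k (a' ++ 'N' :: b) := by
        simp only [pvWins]; rw [if_neg (by simpa using hlen)]
      rw [show (c :: a') ++ 'N' :: b = c :: (a' ++ 'N' :: b) by simp, hexp]
      by_cases hka : k ≤ a'.length + 1
      · have htake : List.take k (c :: (a' ++ 'N' :: b)) = List.take k (c :: a') := by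
          rw [show c :: (a' ++ 'N' :: b) = (c :: a') ++ ('N' :: b) by simp,
              List.take_append_of_le_length (by simpa using hka)]
        have hkeep : pvP (List.take k (c :: (a' ++ 'N' :: b))) = true := by
          rw [htake, pvP_iff]
          intro hm
          exact absurd ((List.take_sublist _ _).mem hm) h
        rw [List.filter_cons_of_pos hkeep, ih ha, htake]
        have hexp2 : pvWins k (c :: a') = List.take k (c :: a') :: pvWins k a' := by
          simp only [pvWins]; rw [if_neg (by omega)]
        rw [hexp2]; simp
      · have hdrop : pvP (List.take k (c :: (a' ++ 'N' :: b))) = false := by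
          rw [Bool.eq_false_iff]
          intro hP
          apply (pvP_iff _).mp hP
          rw [show c :: (a' ++ 'N' :: b) = (c :: a') ++ ('N' :: b) by simp,
              List.take_append]
          refine List.mem_append_right _ ?_
          rcases hkk : k - (c :: a').length with _ | m
          · simp at hkk; omega
          · rw [List.take_succ_cons]; exact List.mem_cons_self ..
        rw [List.filter_cons_of_neg (by simp [hdrop]), ih ha,
            pvWins_nil_of_lt (cs := c :: a') (by simp; omega),
            pvWins_nil_of_lt (cs := a') (by omega)]

-- B's emitted k-mers are exactly the ambiguity-free k-windows, in order
lemma bwins_eq {k : Nat} (hk : 1 ≤ k) :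
    ∀ (cs buf : List Char), 'N' ∉ buf → buf.length ≤ k →
      bwins k buf cs = ((pvWins k (buf ++ cs)).filter pvP).drop (if buf.length = k then 1 else 0) := by
  intro cs
  induction cs with
  | nil =>
    intro buf hfree hle
    by_cases hbk : buf.length = k
    · rw [if_pos hbk]
      simp only [List.append_nil, bwins]
      rw [pvWins_eq_self hk hbk, List.filter_cons_of_pos ((pvP_iff _).mpr hfree)]
      simp
    · rw [if_neg hbk]
      simp only [List.append_nil, bwins]
      rw [pvWins_nil_of_lt (by omega)]
      simp
  | cons c t ih =>
    intro buf hfree hle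
    by_cases hc : c = 'N'
    · subst hc
      have hnil : ¬ (List.length ([] : List Char) = k) := by
        simp only [List.length_nil]; omega
      have h0 : bwins k buf ('N' :: t) = bwins k [] t := by
        simp only [bwins, if_true]
        rw [if_neg hnil, List.nil_append]
      rw [h0, ih [] (by simp) (by simp), pvWins_decomp hk t hfree,
          if_neg hnil]
      simp only [List.nil_append, List.drop_zero]
      by_cases hbk : buf.length = k
      · rw [if_pos hbk, pvWins_eq_self hk hbk]
        simp
      · rw [if_neg hbk, pvWins_nil_of_lt (cs := buf) (by omega)]
        simp
    · have hfree' : 'N' ∉ lastN k (buf ++ [c]) := by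
        intro hm
        have := List.mem_of_mem_drop hm
        rcases List.mem_append.mp this with h1 | h1
        · exact hfree h1
        · simp at h1; exact hc h1.symm
      by_cases hbk : buf.length = k
      · -- buffer already full: it shifts by one
        have hbuf2 : lastN k (buf ++ [c]) = buf.tail ++ [c] := by
          unfold lastN
          rw [List.length_append, List.length_singleton, hbk,
              show k + 1 - k = 1 by omega, List.drop_one, List.tail_append_of_ne_nil]
          intro he; subst he; simp at hbk; omega
        have hbuf' : (if c = 'N' then [] else lastN k (buf ++ [c])) = buf.tail ++ [c] := by
          rw [if_neg hc, hbuf2]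
        have hlen' : (buf.tail ++ [c]).length = k := by
          simp [List.length_tail]; omega
        have hfree'' : 'N' ∉ buf.tail ++ [c] := hbuf2 ▸ hfree'
        simp only [bwins]
        rw [hbuf', if_pos hlen', if_pos hbk,
            ih (buf.tail ++ [c]) hfree'' (by omega),
            show buf ++ c :: t = buf ++ (c :: t) from rfl,
            filter_cons_full hk (c :: t) hbk hfree,
            show buf.tail ++ c :: t = (buf.tail ++ [c]) ++ t by simp,
            filter_cons_full hk t hlen' hfree'']
        simp [hlen']
      · -- buffer not yet full: it grows by one character
        have hbuf2 : lastN k (buf ++ [c]) = buf ++ [c] := by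
          unfold lastN
          rw [show (buf ++ [c]).length - k = 0 by simp; omega, List.drop_zero]
        have hbuf' : (if c = 'N' then [] else lastN k (buf ++ [c])) = buf ++ [c] := by
          rw [if_neg hc, hbuf2]
        have hlen' : (buf ++ [c]).length = buf.length + 1 := by simp
        have hfree'' : 'N' ∉ buf ++ [c] := hbuf2 ▸ hfree'
        simp only [bwins]
        rw [hbuf', if_neg hbk,
            ih (buf ++ [c]) hfree'' (by omega),
            show buf ++ c :: t = (buf ++ [c]) ++ t by simp]
        by_cases hfull : buf.length + 1 = k
        · rw [if_pos (by omega), if_pos (by omega),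
              filter_cons_full hk t (by omega) hfree'']
          simp
        · rw [if_neg (by omega), if_neg (by omega)]
          simp

-- windows as range-indexed slices (bridges port A's loop to pvWins)
lemma pvWins_eq_range {k : Nat} (hk : 1 ≤ k) (cs : List Char) :
    pvWins k cs = (List.range (cs.length + 1 - k)).map (fun i => (cs.drop i).take k) := by
  induction cs with
  | nil => simp [pvWins, Nat.sub_eq_zero_of_le hk]
  | cons c t ih =>
    by_cases hlen : t.length + 1 < k
    · rw [pvWins_nil_of_lt (by simpa using hlen), List.length_cons,
          show t.length + 1 + 1 - k = 0 by omega]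
      simp
    · have hexp : pvWins k (c :: t) = List.take k (c :: t) :: pvWins k t := by
        simp only [pvWins]; rw [if_neg hlen]
      rw [hexp, ih, List.length_cons, show t.length + 1 + 1 - k = (t.length + 1 - k) + 1 by omega,
          List.range_succ_eq_map]
      simp [List.map_map, Function.comp_def]

lemma pyRange_zero_nonpos {b : Int} (h : b ≤ 0) : PySem.List.pyRange 0 b 1 = [] := by
  simp [PySem.List.pyRange, show ¬((0:Int) < b) by omega]

lemma pvSliceMap (s : String) {k : Int} (hk : 1 ≤ k) :
    (PySem.List.pyRange 0 (PySem.Str.len s - k + 1) 1).map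
        (fun i => PySem.Str.slice s (some i) (some (i + k)))
      = (pvWins k.toNat s.toList).map String.ofList := by
  by_cases hkn : k ≤ (s.toList.length : Int)
  · have h1 : PySem.Str.len s - k + 1 = ((s.toList.length + 1 - k.toNat : Nat) : Int) := by
      rw [PySem.Str.len_eq]; omega
    rw [h1, PySem.List.pyRange_zero_natCast, List.map_map,
        pvWins_eq_range (by omega) s.toList, List.map_map]
    apply List.map_congr_left
    intro i _
    simp only [Function.comp_apply]
    apply String.toList_inj.mp
    rw [String.toList_ofList]
    simp only [PySem.Str.toList_slice, PySem.Chars.slice_eq_listSlice]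
    rw [show (i : Int) + k = (i : Int) + (k.toNat : Int) by omega, PySem.List.slice_natCast_add]
  · rw [pyRange_zero_nonpos (by rw [PySem.Str.len_eq]; omega),
        pvWins_nil_of_lt (by omega)]
    rfl

-- port A's inner loop as a fold over the ambiguity-free windows
lemma pvInnerA (tid : String) (s : String) {k : Int} (hk : 1 ≤ k)
    (d : PySem.Dict String (PySem.Set String)) :
    (PySem.List.pyRange 0 (PySem.Str.len s - k + 1) 1).foldl
        (fun d i =>
          let kmer := PySem.Str.slice s (some i) (some (i + k))
          if !(PySem.Str.isIn "N" kmer) then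
            d.modify kmer PySem.Set.empty (fun st => PySem.Set.add st tid)
          else d) d
      = (((pvWins k.toNat s.toList).filter pvP).map String.ofList).foldl (pvAdd tid) d := by
  have h1 : (PySem.List.pyRange 0 (PySem.Str.len s - k + 1) 1).foldl
        (fun d i =>
          let kmer := PySem.Str.slice s (some i) (some (i + k))
          if !(PySem.Str.isIn "N" kmer) then
            d.modify kmer PySem.Set.empty (fun st => PySem.Set.add st tid)
          else d) d
      = ((PySem.List.pyRange 0 (PySem.Str.len s - k + 1) 1).map
            (fun i => PySem.Str.slice s (some i) (some (i + k)))).foldl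
          (fun d km => if !(PySem.Str.isIn "N" km) then pvAdd tid d km else d) d := by
    rw [List.foldl_map]
    rfl
  rw [h1, pvSliceMap s hk, PySem.List.foldl_if_eq_foldl_filter, List.filter_map,
      List.filter_congr (fun w _ => show (((fun km => !(PySem.Str.isIn "N" km)) ∘ String.ofList) w) = pvP w by
        simp [pvP, Function.comp_apply]),
      List.foldl_map]

-- port B's inner loop accumulates pvAdd over bwins
lemma pvFoldB (tid : String) {k : Int} (hk : 1 ≤ k) :
    ∀ (cs bufL : List Char) (d : PySem.Dict String (PySem.Set String)),
    (cs.foldl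
        (fun (st : String × PySem.Dict String (PySem.Set String)) ch =>
          let buf := if ch = 'N' then "" else PySem.Str.slice (st.1.push ch) (some (-k)) none
          if PySem.Str.len buf = k then
            (buf, st.2.modify buf PySem.Set.empty (fun s => PySem.Set.add s tid))
          else (buf, st.2))
        (String.ofList bufL, d)).2
      = ((bwins k.toNat bufL cs).map String.ofList).foldl (pvAdd tid) d := by
  intro cs
  induction cs with
  | nil => intro bufL d; simp [bwins]
  | cons c t ih =>
    intro bufL d
    have hpl : ((String.ofList bufL).push c).toList = bufL ++ [c] := by
      rw [String.toList_push, String.toList_ofList]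
    have hslice : PySem.Str.slice ((String.ofList bufL).push c) (some (-k)) none
        = String.ofList (lastN k.toNat (bufL ++ [c])) := by
      apply String.toList_inj.mp
      rw [String.toList_ofList]
      simp only [PySem.Str.toList_slice, PySem.Chars.slice_eq_listSlice]
      rw [hpl, show (-k : Int) = -((k.toNat : Nat) : Int) by omega,
          PySem.List.slice_from_neg_natCast _ _ (by omega)]
      rfl
    have hbufeq : (if c = 'N' then "" else PySem.Str.slice ((String.ofList bufL).push c) (some (-k)) none)
        = String.ofList (if c = 'N' then [] else lastN k.toNat (bufL ++ [c])) := by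
      by_cases hc : c = 'N' <;> simp [hc, hslice]
    have hlen : ∀ l : List Char, (PySem.Str.len (String.ofList l) = k) ↔ (l.length = k.toNat) := by
      intro l
      rw [PySem.Str.len_eq, String.toList_ofList]
      omega
    simp only [List.foldl_cons, bwins, hbufeq]
    by_cases hfull : (if c = 'N' then [] else lastN k.toNat (bufL ++ [c])).length = k.toNat
    · rw [if_pos ((hlen _).mpr hfull), if_pos hfull, ih]
      simp [pvAdd]
    · rw [if_neg (fun h => hfull ((hlen _).mp h)), if_neg hfull, ih]
      simp

lemma pvInnerB (tid : String) (s : String) {k : Int} (hk : 1 ≤ k)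
    (d : PySem.Dict String (PySem.Set String)) :
    (s.toList.foldl
        (fun (st : String × PySem.Dict String (PySem.Set String)) ch =>
          let buf := if ch = 'N' then "" else PySem.Str.slice (st.1.push ch) (some (-k)) none
          if PySem.Str.len buf = k then
            (buf, st.2.modify buf PySem.Set.empty (fun s => PySem.Set.add s tid))
          else (buf, st.2))
        ("", d)).2
      = (((pvWins k.toNat s.toList).filter pvP).map String.ofList).foldl (pvAdd tid) d := by
  have h0 : ("" : String) = String.ofList [] := rfl
  rw [h0, pvFoldB tid hk s.toList [] d,
      bwins_eq (by omega) s.toList [] (by simp) (by simp),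
      if_neg (show ¬ (List.length ([] : List Char) = k.toNat) by
        simp only [List.length_nil]; omega)]
  simp

-- ===== VERDICT (by name: the statement is the Claim_ definition above) =====
theorem build_transcript_kmer_index_py_spec : Claim_equal_build_transcript_kmer_index_py := by
  unfold Claim_equal_build_transcript_kmer_index_py
  intro tv k _ hpre
  unfold Spec_build_transcript_kmer_index_py
  unfold build_transcript_kmer_index_py build_transcript_kmer_index_py_alt
  have hk : 1 ≤ k := hpre
  congr 1
  apply PySem.List.foldl_congr_mem
  intro acc tvp _
  rw [pvInnerA tvp.1 tvp.2 hk acc, pvInnerB tvp.1 tvp.2 hk acc]
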